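-- pv_equiv track=rewrite | github.com/fabiansdp/code-eval-dissertation | gotester.py | remove_main_function
-- ===== SOURCE A (Python) =====
-- def remove_main_function(go_code):
--     lines = go_code.splitlines()
--     output = []
--     inside_main = False
--     brace_count = 0
--
--     i = 0
--     while i < len(lines):
--         line = lines[i]
--         stripped = line.strip()
--
--         if not inside_main and stripped.startswith("func main()"):
--             # Found the start of main function
--             inside_main = True
--             # Count braces to find end of block
--             brace_count += line.count('{') - line.count('}')
--         elif inside_main:
--             brace_count += line.count('{') - line.count('}')
--             if brace_count == 0:
--                 inside_main = False  # End of main reached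
--         else:
--             output.append(line)
--
--         i += 1
--
--     return "\n".join(output).strip()
-- ===== SOURCE B (Python) =====
-- def remove_main_function(go_code):
--     # Block-skipping consumer: when a main header is seen, hand the tail to a
--     # skipper that drops lines until the brace balance returns to zero.
--     def skip(bal, rest):
--         while rest:
--             line, rest = rest[0], rest[1:]
--             bal += line.count('{') - line.count('}')
--             if bal == 0:
--                 return rest
--         return []
--
--     out = []
--     rest = go_code.splitlines()
--     while rest:
--         line, rest = rest[0], rest[1:]
--         if line.strip().startswith("func main()"):
--             rest = skip(line.count('{') - line.count('}'), rest)
--         else: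
--             out.append(line)
--     return "\n".join(out).strip()
-- ===== Notes on version B (the rewrite author's own statement) =====
-- stated objective: alternative
-- what changed: Replaces A's single pass with an inside_main/brace_count state machine carried across every line by a block-skipping decomposition: an outer consumer copies lines and, on a main header, delegates the whole block to an inner skipper that drops lines until the brace balance returns to zero.
import Mathlib
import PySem

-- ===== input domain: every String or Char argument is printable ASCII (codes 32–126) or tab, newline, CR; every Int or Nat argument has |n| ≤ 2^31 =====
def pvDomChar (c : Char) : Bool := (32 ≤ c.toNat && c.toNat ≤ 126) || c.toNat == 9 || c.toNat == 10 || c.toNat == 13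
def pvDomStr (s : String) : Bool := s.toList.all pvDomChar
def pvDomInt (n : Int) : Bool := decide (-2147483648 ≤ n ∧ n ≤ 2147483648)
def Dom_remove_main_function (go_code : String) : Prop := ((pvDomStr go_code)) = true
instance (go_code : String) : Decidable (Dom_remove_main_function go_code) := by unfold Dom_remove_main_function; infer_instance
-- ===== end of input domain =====

-- B replaces A's one-pass inside_main/brace_count state machine with a block-skipping decomposition (alternative, same cost).

-- ===== PORT A =====
-- A's loop body: state (output, inside_main, brace_count), one step per line.
def aStep : (List String × Bool × Int) → String → (List String × Bool × Int)
  | (output, insideMain, braceCount), line =>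
    let stripped := PySem.Str.strip line
    if insideMain = false ∧ PySem.Str.startswith stripped "func main()" then
      (output, true, braceCount + ((PySem.Str.count line "{" : Int) - (PySem.Str.count line "}" : Int)))
    else if insideMain then
      let c := braceCount + ((PySem.Str.count line "{" : Int) - (PySem.Str.count line "}" : Int))
      if c = 0 then (output, false, c) else (output, true, c)
    else
      (output ++ [line], insideMain, braceCount)

def remove_main_function (go_code : String) : String :=
  let lines := PySem.Str.splitlines go_code
  PySem.Str.strip (PySem.Str.join "\n" ((lines.foldl aStep ([], false, 0)).1))

-- ===== PORT B =====
def bDelta (line : String) : Int :=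
  (PySem.Str.count line "{" : Int) - (PySem.Str.count line "}" : Int)

-- 'skip' of Source B: drop lines until the brace balance returns to zero, return the rest.
def bSkip : Int → List String → List String
  | _, [] => []
  | bal, l :: rest =>
    if bal + bDelta l = 0 then rest else bSkip (bal + bDelta l) rest

theorem bSkip_length_le (bal : Int) (ls : List String) : (bSkip bal ls).length ≤ ls.length := by
  induction ls generalizing bal with
  | nil => simp [bSkip]
  | cons l rest ih =>
    simp only [bSkip]
    split
    · simp
    · exact Nat.le_trans (ih _) (Nat.le_succ _)

-- outer consumer of Source B
def bScan : List String → List String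
  | [] => []
  | l :: rest =>
    if PySem.Str.startswith (PySem.Str.strip l) "func main()" then
      bScan (bSkip (bDelta l) rest)
    else
      l :: bScan rest
termination_by ls => ls.length
decreasing_by
· exact Nat.lt_succ_of_le (bSkip_length_le _ _)
· simp

def remove_main_function_alt (go_code : String) : String :=
  PySem.Str.strip (PySem.Str.join "\n" (bScan (PySem.Str.splitlines go_code)))

-- ===== PRECONDITION & SPEC =====
def Spec_remove_main_function (go_code : String) (out : String) : Prop := out = remove_main_function_alt go_code
instance (go_code : String) (out : String) : Decidable (Spec_remove_main_function go_code out) := by unfold Spec_remove_main_function; infer_instance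

-- ===== CLAIM (what is proved, stated in full; the proofs are below) =====
def Claim_equal_remove_main_function : Prop := ∀ (go_code : String), Dom_remove_main_function go_code → Spec_remove_main_function go_code (remove_main_function go_code)

-- ===== LEMMAS AND PROOFS =====
-- Inside main, A's fold produces no output and exits exactly where bSkip resumes.
theorem foldl_aStep_inside (ls : List String) (acc : List String) (bal : Int) :
    (ls.foldl aStep (acc, true, bal)).1 = ((bSkip bal ls).foldl aStep (acc, false, 0)).1 := by
  induction ls generalizing bal with
  | nil => simp [bSkip]
  | cons l rest ih =>
    have hs : aStep (acc, true, bal) l =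
        if bal + bDelta l = 0 then (acc, false, bal + bDelta l)
        else (acc, true, bal + bDelta l) := by
      simp [aStep, bDelta]
    rw [List.foldl_cons, hs]
    by_cases h : bal + bDelta l = 0
    · rw [if_pos h, bSkip, if_pos h, h]
    · rw [if_neg h, bSkip, if_neg h, ih]

-- Outside main, A's fold appends exactly bScan of the remaining lines.
theorem foldl_aStep_outside (ls : List String) (acc : List String) :
    (ls.foldl aStep (acc, false, 0)).1 = acc ++ bScan ls := by
  induction ls using bScan.induct generalizing acc with
  | case1 => simp [bScan]
  | case2 l rest h ih =>
    have hs : aStep (acc, false, 0) l = (acc, true, bDelta l) := by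
      simp only [PySem.Str.startswith_eq, PySem.Str.toList_strip, show "func main()".toList = ['f','u','n','c',' ','m','a','i','n','(',')'] from rfl] at h
      simp [aStep, bDelta, h]
    rw [List.foldl_cons, hs, foldl_aStep_inside, ih, bScan, if_pos h]
  | case3 l rest h ih =>
    have hs : aStep (acc, false, 0) l = (acc ++ [l], false, 0) := by
      simp only [PySem.Str.startswith_eq, PySem.Str.toList_strip, show "func main()".toList = ['f','u','n','c',' ','m','a','i','n','(',')'] from rfl] at h
      simp [aStep, h]
    rw [List.foldl_cons, hs, ih, bScan, if_neg h]
    simp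

-- ===== VERDICT (by name: the statement is the Claim_ definition above) =====
theorem remove_main_function_spec : Claim_equal_remove_main_function := by
  intro go_code _
  unfold Spec_remove_main_function remove_main_function remove_main_function_alt
  simp only [foldl_aStep_outside]
  rfl
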